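-- pv_equiv track=rewrite | github.com/JerryYK/MTH325 | minimum_spanning_trees.py | in_chains
-- ===== SOURCE A (Python) =====
-- def in_chains(chains, edge):
--     position_dict = {edge[0]: 0, edge[1]: 0}  # vertex value defaults to zero
--     for item in edge:   # ## for each vertex
--         counter = 0     # <== positional value of chain (zero equals not found)
--         for chain in chains:    # ### for each chain in the list
--             if item in chain:   # #### if the vertex is in the chain
--                 counter += 1    # Raise the counter
--                 position_dict[item] = counter   # and store the value
--             else:
--                 counter += 1  # #### otherwise just raise the value
--     return [position_dict[edge[0]], position_dict[edge[1]]]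
--     """Returns a pair of values, one for each vertex.  0 means not found, X represents which chain it was found in"""
-- ===== SOURCE B (Python) =====
-- def in_chains(chains, edge):
--     index = {}
--     for number, chain in enumerate(chains, 1):
--         for vertex in chain:
--             index[vertex] = number
--     return [index.get(edge[0], 0), index.get(edge[1], 0)]
-- ===== Notes on version B (the rewrite author's own statement) =====
-- stated objective: faster
-- what changed: Replaces the per-vertex rescans of all chains with a single index-building pass over the chains (later chains overwrite earlier entries) followed by two O(1) dict lookups.
import Mathlib
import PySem

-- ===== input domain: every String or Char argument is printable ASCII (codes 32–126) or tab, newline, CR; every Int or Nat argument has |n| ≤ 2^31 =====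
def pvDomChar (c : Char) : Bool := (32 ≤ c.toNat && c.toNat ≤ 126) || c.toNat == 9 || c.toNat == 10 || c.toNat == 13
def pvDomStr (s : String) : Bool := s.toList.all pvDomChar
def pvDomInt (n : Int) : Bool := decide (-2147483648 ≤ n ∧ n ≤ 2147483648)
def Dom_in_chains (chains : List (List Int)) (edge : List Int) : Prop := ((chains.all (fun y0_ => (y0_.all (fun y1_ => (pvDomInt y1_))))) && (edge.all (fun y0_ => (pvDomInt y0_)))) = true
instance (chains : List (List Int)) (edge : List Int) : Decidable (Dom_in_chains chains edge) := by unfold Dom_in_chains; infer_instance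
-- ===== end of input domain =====

-- B replaces A's per-vertex rescans of all chains by one index-building pass over the
-- chains followed by two dict lookups (objective: faster, asymptotic).

-- ===== PORT A =====
def in_chains (chains : List (List Int)) (edge : List Int) : List Int :=
  match PySem.List.pyGet? edge 0, PySem.List.pyGet? edge 1 with
  | some e0, some e1 =>
    let d0 : PySem.Dict Int Int := (PySem.Dict.empty.insert e0 0).insert e1 0
    let d := edge.foldl (fun d item =>
      (chains.foldl (fun (p : Int × PySem.Dict Int Int) chain =>
          if item ∈ chain then (p.1 + 1, p.2.insert item (p.1 + 1))
          else (p.1 + 1, p.2)) ((0 : Int), d)).2) d0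
    [d.getD e0 0, d.getD e1 0]
  | _, _ => []   -- IndexError on edge[0]/edge[1]: excluded by Pre_in_chains

-- ===== PORT B =====
def in_chains_alt (chains : List (List Int)) (edge : List Int) : List Int :=
  match PySem.List.pyGet? edge 0 with
  | none => []   -- IndexError on edge[0]: excluded by Pre_in_chains
  | some e0 =>
    match PySem.List.pyGet? edge 1 with
    | none => []   -- IndexError on edge[1]: excluded by Pre_in_chains
    | some e1 =>
      let idx := (chains.foldl (fun (p : Int × PySem.Dict Int Int) chain =>
          (p.1 + 1, chain.foldl (fun d v => d.insert v p.1) p.2)) ((1 : Int), PySem.Dict.empty)).2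
      [idx.getD e0 0, idx.getD e1 0]

-- ===== PRECONDITION & SPEC =====
-- A (and B) raise IndexError on edge[0]/edge[1] when edge has fewer than two elements.
def Pre_in_chains (chains : List (List Int)) (edge : List Int) : Prop := 2 ≤ edge.length
instance (chains : List (List Int)) (edge : List Int) : Decidable (Pre_in_chains chains edge) := by unfold Pre_in_chains; infer_instance

def pvWitness_in_chains : List (List Int) × List Int := ([[1, 2], [3]], [1, 3])

def Spec_in_chains (chains : List (List Int)) (edge : List Int) (out : List Int) : Prop := out = in_chains_alt chains edge
instance (chains : List (List Int)) (edge : List Int) (out : List Int) : Decidable (Spec_in_chains chains edge out) := by unfold Spec_in_chains; infer_instance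

-- ===== CLAIM (what is proved, stated in full; the proofs are below) =====
def Claim_equal_in_chains : Prop := ∀ (chains : List (List Int)) (edge : List Int), Dom_in_chains chains edge → Pre_in_chains chains edge → Spec_in_chains chains edge (in_chains chains edge)

-- ===== LEMMAS AND PROOFS =====

-- last 1-based-from-c chain index containing x (later chains win), none if absent
def lastIdx : List (List Int) → Int → Int → Option Int
  | [], _, _ => none
  | ch :: rest, x, c =>
    match lastIdx rest x (c + 1) with
    | some v => some v
    | none => if x ∈ ch then some c else none

-- B's inner loop: inserting every vertex of a chain at value k
theorem b_inner (chain : List Int) (k : Int) (d : PySem.Dict Int Int) (x : Int) :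
    (chain.foldl (fun d v => d.insert v k) d).get? x
      = if x ∈ chain then some k else d.get? x := by
  induction chain generalizing d with
  | nil => simp
  | cons v vs ih =>
    simp only [List.foldl_cons, ih, List.mem_cons]
    by_cases hvs : x ∈ vs
    · simp [hvs]
    · by_cases hv : x = v <;> simp [hvs, hv, PySem.Dict.get?_insert]

-- B's outer loop
theorem b_outer (chains : List (List Int)) (c : Int) (d : PySem.Dict Int Int) (x : Int) :
    ((chains.foldl (fun (p : Int × PySem.Dict Int Int) chain =>
        (p.1 + 1, chain.foldl (fun d v => d.insert v p.1) p.2)) (c, d)).2).get? x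
      = match lastIdx chains x c with
        | some v => some v
        | none => d.get? x := by
  induction chains generalizing c d with
  | nil => simp [lastIdx]
  | cons ch rest ih =>
    simp only [List.foldl_cons, ih, lastIdx]
    rcases h : lastIdx rest x (c + 1) with _ | v
    · simp only [b_inner]
      by_cases hx : x ∈ ch <;> simp [hx]
    · rfl

-- A's inner loop (over chains, for a fixed item, counter starting at c)
theorem a_inner (chains : List (List Int)) (item : Int) (c : Int) (d : PySem.Dict Int Int) (x : Int) :
    ((chains.foldl (fun (p : Int × PySem.Dict Int Int) chain =>
        if item ∈ chain then (p.1 + 1, p.2.insert item (p.1 + 1))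
        else (p.1 + 1, p.2)) (c, d)).2).get? x
      = if x = item then
          (match lastIdx chains item (c + 1) with
           | some v => some v
           | none => d.get? x)
        else d.get? x := by
  induction chains generalizing c d with
  | nil => simp [lastIdx]
  | cons ch rest ih =>
    by_cases hm : item ∈ ch
    · simp only [List.foldl_cons, hm, if_pos, ih, lastIdx]
      rcases h : lastIdx rest item (c + 1 + 1) with _ | v
      · by_cases hx : x = item <;>
          simp [hx, hm, h, PySem.Dict.get?_insert]
      · by_cases hx : x = item <;> simp [hx, hm, h, PySem.Dict.get?_insert]
    · simp only [List.foldl_cons, hm, if_false, ih, lastIdx]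
      rcases h : lastIdx rest item (c + 1 + 1) with _ | v <;>
        by_cases hx : x = item <;> simp [hx, h]

-- A's outer loop (over edge items)
theorem a_outer (edge : List Int) (chains : List (List Int)) (d : PySem.Dict Int Int) (x : Int) :
    (edge.foldl (fun d item =>
        (chains.foldl (fun (p : Int × PySem.Dict Int Int) chain =>
            if item ∈ chain then (p.1 + 1, p.2.insert item (p.1 + 1))
            else (p.1 + 1, p.2)) ((0 : Int), d)).2) d).get? x
      = if x ∈ edge then
          (match lastIdx chains x 1 with
           | some v => some v
           | none => d.get? x)
        else d.get? x := by
  induction edge generalizing d with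
  | nil => simp
  | cons item rest ih =>
    simp only [List.foldl_cons, ih, List.mem_cons]
    have hin := a_inner chains item 0 d x
    norm_num at hin
    rw [hin]
    rcases h : lastIdx chains x 1 with _ | v
    · by_cases hx : x = item
      · subst hx; simp [h]
      · simp [hx]
    · by_cases hr : x ∈ rest
      · simp [hr]
      · by_cases hx : x = item
        · subst hx; simp [hr, h]
        · simp [hx, hr]

-- ===== VERDICT (by name: the statement is the Claim_ definition above) =====
theorem in_chains_spec : Claim_equal_in_chains := by
  intro chains edge _ hpre
  unfold Spec_in_chains in_chains in_chains_alt
  match edge, hpre with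
  | e0 :: e1 :: rest, _ =>
    have hg0 : PySem.List.pyGet? (e0 :: e1 :: rest) 0 = some e0 := by
      have hn : (0:Int) ≤ (rest.length:Int) + 1 := by positivity
      simp [PySem.List.pyGet?, PySem.List.pyIdx?, hn]
    have hg1 : PySem.List.pyGet? (e0 :: e1 :: rest) 1 = some e1 := by
      simp [PySem.List.pyGet?, PySem.List.pyIdx?]
    have hA := a_outer (e0 :: e1 :: rest) chains ((PySem.Dict.empty.insert e0 0).insert e1 0)
    have hB := b_outer chains 1 PySem.Dict.empty
    have h0 : ∀ x : Int, x = e0 ∨ x = e1 →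
        ((PySem.Dict.empty.insert e0 (0 : Int)).insert e1 0).get? x = some 0 := by
      rintro x (rfl | rfl) <;> simp [PySem.Dict.get?_insert] <;> split_ifs <;> rfl
    have key : ∀ x : Int, x = e0 ∨ x = e1 →
        ((e0 :: e1 :: rest).foldl (fun d item =>
            (chains.foldl (fun (p : Int × PySem.Dict Int Int) chain =>
                if item ∈ chain then (p.1 + 1, p.2.insert item (p.1 + 1))
                else (p.1 + 1, p.2)) ((0 : Int), d)).2)
            ((PySem.Dict.empty.insert e0 0).insert e1 0)).getD x 0
        = ((chains.foldl (fun (p : Int × PySem.Dict Int Int) chain =>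
              (p.1 + 1, chain.foldl (fun d v => d.insert v p.1) p.2))
              ((1 : Int), PySem.Dict.empty)).2).getD x 0 := by
      intro x hx
      rw [PySem.Dict.getD_eq_get?_getD, PySem.Dict.getD_eq_get?_getD, hA x, hB x]
      have hmem : x ∈ e0 :: e1 :: rest := by rcases hx with rfl | rfl <;> simp
      rw [if_pos hmem]
      rcases h : lastIdx chains x 1 with _ | v
      · simp [h0 x hx]
      · rfl
    simp only [hg0, hg1]
    rw [key e0 (Or.inl rfl), key e1 (Or.inr rfl)]
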